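-- pv_equiv track=rewrite | github.com/Wind-yk/FBXViewer | src/packages/fbx.py | list2edges
-- ===== SOURCE A (Python) =====
-- def list2edges(l: list):
--     """
--     Converts the list of FBX edges to a list tuples of 2 vertices.
--
--     This may reduce the performance when drawing.
--
--     # Example
--     `[0, 4, 6, -3]` is converted to `[(0, 4), (4, 6), (6, 2), (2, 0)]`.
--     """
--     i = 0
--     out = []
--     first_index = 0
--     while i < len(l)-1:
--         x = l[i]   if l[i]   >= 0 else -l[i]   - 1
--         y = l[i+1] if l[i+1] >= 0 else -l[i+1] - 1
--         out.append((x,y))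
--         if l[i+1] < 0:
--             out.append((y,l[first_index]))
--             i += 2
--             first_index = i
--         else:
--             i += 1
--     return out
-- ===== SOURCE B (Python) =====
-- def list2edges(l: list):
--     """Group-based re-implementation: split the list into faces, then emit
--     each face's edges (decoded consecutive pairs plus, for a terminated face,
--     a closing edge back to the face's raw first element)."""
--     faces = []
--     cur = []
--     for v in l:
--         cur.append(v)
--         if v < 0 and len(cur) >= 2:
--             faces.append((cur, True))
--             cur = []
--     if cur:
--         faces.append((cur, False))
--     out = []
--     for face, terminated in faces:
--         dec = [v if v >= 0 else -v - 1 for v in face]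
--         out.extend(zip(dec, dec[1:]))
--         if terminated:
--             out.append((dec[-1], face[0]))
--     return out
-- ===== Notes on version B (the rewrite author's own statement) =====
-- stated objective: alternative
-- what changed: Replaces A's index-juggling while loop (pair emission with an in-loop skip over terminators and a first_index register) by a two-phase decomposition: first split the list into faces (a group closes when a negative value lands in a non-empty group), then emit each face's decoded consecutive-pair edges plus, for terminated faces, a closing edge to the raw first element.
import Mathlib
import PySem

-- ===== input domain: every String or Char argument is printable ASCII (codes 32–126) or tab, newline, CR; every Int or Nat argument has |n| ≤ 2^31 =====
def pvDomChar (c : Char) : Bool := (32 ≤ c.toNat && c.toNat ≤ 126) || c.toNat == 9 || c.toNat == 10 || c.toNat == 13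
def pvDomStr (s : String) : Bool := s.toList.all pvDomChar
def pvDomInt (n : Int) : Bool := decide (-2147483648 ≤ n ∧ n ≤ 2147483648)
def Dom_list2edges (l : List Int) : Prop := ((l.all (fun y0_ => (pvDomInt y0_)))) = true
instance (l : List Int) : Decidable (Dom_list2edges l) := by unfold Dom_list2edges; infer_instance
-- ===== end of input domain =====

-- B re-implements A's while-loop as a two-phase decomposition (split into faces, then emit each face's edges); same O(n) cost, equivalence proved on all inputs.


-- ===== PORT A =====
-- the while loop of A; i and first_index start at 0 and only ever grow, so they are Nats.
-- All list indexing is with indices the loop guard keeps in range (first ≤ i < i+1 < len l),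
-- so Python's l[i] never raises and is ported as getD.
def pvLoopA (l : List Int) (i first : Nat) (out : List (Int × Int)) : List (Int × Int) :=
  if _h : i + 1 < l.length then   -- i < len(l)-1
    let x := if l.getD i 0 ≥ 0 then l.getD i 0 else -(l.getD i 0) - 1
    let y := if l.getD (i+1) 0 ≥ 0 then l.getD (i+1) 0 else -(l.getD (i+1) 0) - 1
    let out' := out ++ [(x, y)]
    if l.getD (i+1) 0 < 0 then
      pvLoopA l (i+2) (i+2) (out' ++ [(y, l.getD first 0)])
    else
      pvLoopA l (i+1) first out'
  else out
termination_by l.length - i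

def list2edges (l : List Int) : List (Int × Int) := pvLoopA l 0 0 []

-- ===== PORT B =====
-- phase 1 of Source B: split into faces; a face closes when a negative value makes cur (after append) length ≥ 2
def pvGrp (cur : List Int) (xs : List Int) : List (List Int × Bool) :=
  match xs with
  | [] => if cur = [] then [] else [(cur, false)]
  | v :: t =>
    let cur' := cur ++ [v]
    if v < 0 ∧ 2 ≤ cur'.length then (cur', true) :: pvGrp [] t else pvGrp cur' t

-- phase 2 of Source B: edges of one face (dec[-1] and face[0] ported with getLastD/headD; a
-- terminated face always has ≥ 2 elements, so the defaults are never used)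
def pvEmit (face : List Int × Bool) : List (Int × Int) :=
  let dec := face.1.map (fun v => if v ≥ 0 then v else -v - 1)
  (dec.zip dec.tail) ++ (if face.2 then [(dec.getLastD 0, face.1.headD 0)] else [])

def list2edges_alt (l : List Int) : List (Int × Int) :=
  (pvGrp [] l).flatMap pvEmit

-- ===== PRECONDITION & SPEC =====
def Spec_list2edges (l : List Int) (out : List (Int × Int)) : Prop := out = list2edges_alt l
instance (l : List Int) (out : List (Int × Int)) : Decidable (Spec_list2edges l out) := by unfold Spec_list2edges; infer_instance

-- ===== CLAIM (what is proved, stated in full; the proofs are below) =====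
def Claim_equal_list2edges : Prop := ∀ (l : List Int), Dom_list2edges l → Spec_list2edges l (list2edges l)

-- ===== LEMMAS AND PROOFS =====

-- decode of one raw value
def pvD (v : Int) : Int := if v ≥ 0 then v else -v - 1

-- reference recursion: edges emitted from the suffix starting at the current element,
-- f being the raw first element of the current face
def pvGo (f : Int) : List Int → List (Int × Int)
  | [] => []
  | [_] => []
  | x :: y :: t =>
    (pvD x, pvD y) ::
      (if y < 0 then
        (pvD y, f) :: (match t with | [] => [] | a :: r => pvGo a (a :: r))
      else pvGo f (y :: t))

-- edges from a fresh suffix (a new face starts at its head)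
def pvEF : List Int → List (Int × Int)
  | [] => []
  | a :: r => pvGo a (a :: r)

theorem pvGo_pos (f x y : Int) (t : List Int) (h : ¬ y < 0) :
    pvGo f (x :: y :: t) = (pvD x, pvD y) :: pvGo f (y :: t) := by
  conv_lhs => rw [pvGo.eq_def]; simp [h]
theorem pvGo_neg_nil (f x y : Int) (h : y < 0) :
    pvGo f [x, y] = [(pvD x, pvD y), (pvD y, f)] := by
  conv_lhs => rw [pvGo.eq_def]
  simp [h]
theorem pvGo_neg_cons (f x y a : Int) (r : List Int) (h : y < 0) :
    pvGo f (x :: y :: a :: r) = (pvD x, pvD y) :: (pvD y, f) :: pvGo a (a :: r) := by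
  conv_lhs => rw [pvGo.eq_def]
  simp [h]
theorem pv_headD_append (c t : List Int) (d : Int) (hc : c ≠ []) :
    (c ++ t).headD d = c.headD d := by
  cases c with
  | nil => exact absurd rfl hc
  | cons a r => rfl
theorem pv_zip_concat (d : List Int) (a : Int) (hd : d ≠ []) :
    (d ++ [a]).zip ((d ++ [a]).tail) = d.zip d.tail ++ [(d.getLastD 0, a)] := by
  induction d with
  | nil => exact absurd rfl hd
  | cons x d' ih =>
    cases d' with
    | nil => simp
    | cons y t =>
      have h2 := ih (by simp)
      simp only [List.cons_append, List.zip_cons_cons, List.tail_cons] at *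
      simp [h2]
theorem pv_getLastD_map (c : List Int) (d : Int) :
    (c.map pvD).getLastD (pvD d) = pvD (c.getLastD d) := by
  induction c generalizing d with
  | nil => rfl
  | cons x r ih =>
    simp only [List.map_cons, List.getLastD_cons]
    exact ih x

theorem pvGrp_aux (n : Nat) : ∀ (xs c : List Int), xs.length ≤ n → c ≠ [] →
    (pvGrp c xs).flatMap pvEmit =
      ((c.map pvD).zip (c.map pvD).tail) ++ pvGo (c.headD 0) (c.getLastD 0 :: xs) := by
  induction n with
  | zero =>
    intro xs c hlen hc
    have hx : xs = [] := by cases xs with | nil => rfl | cons a b => simp at hlen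
    subst hx
    simp [pvGrp, hc, pvEmit, pvGo, pvD, show (fun v : Int => if v ≥ 0 then v else -v - 1) = pvD from rfl]
  | succ n ih =>
    intro xs c hlen hc
    cases xs with
    | nil => simp [pvGrp, hc, pvEmit, pvGo, pvD, show (fun v : Int => if v ≥ 0 then v else -v - 1) = pvD from rfl]
    | cons v t =>
      have hlc : 1 ≤ c.length := by cases c with | nil => exact absurd rfl hc | cons _ _ => simp
      have hmapc : c.map pvD ≠ [] := by cases c with | nil => exact absurd rfl hc | cons _ _ => simp
      have hlen' : t.length ≤ n := by simp at hlen; omega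
      by_cases hv : v < 0
      · have hg : pvGrp c (v :: t) = (c ++ [v], true) :: pvGrp [] t := by
          simp only [pvGrp]
          rw [if_pos ⟨hv, by simp; omega⟩]
        rw [hg]
        have hemit : pvEmit (c ++ [v], true) =
            ((c.map pvD).zip (c.map pvD).tail) ++
              [(pvD (c.getLastD 0), pvD v), (pvD v, c.headD 0)] := by
          have hlast : (c.map pvD).getLastD 0 = pvD (c.getLastD 0) := by
            have h := pv_getLastD_map c 0
            rwa [show pvD 0 = 0 from rfl] at h
          simp only [pvEmit]
          show ((c ++ [v]).map pvD).zip ((c ++ [v]).map pvD).tail ++ _ = _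
          simp only [List.map_append, List.map_cons, List.map_nil]
          rw [pv_zip_concat _ _ hmapc, List.getLastD_concat, pv_headD_append _ _ _ hc, hlast]
          simp [pvD]
        cases t with
        | nil =>
          rw [pvGo_neg_nil _ _ _ hv]
          simp [hemit, pvGrp]
        | cons a r =>
          rw [pvGo_neg_cons _ _ _ _ _ hv]
          have hg2 : pvGrp ([] : List Int) (a :: r) = pvGrp [a] r := by
            simp [pvGrp]
          have hr : (pvGrp [a] r).flatMap pvEmit = pvGo a (a :: r) := by
            have := ih r [a] (by simp at hlen'; omega) (by simp)
            simpa using this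
          simp [hemit, hg2, hr]
      · have hg : pvGrp c (v :: t) = pvGrp (c ++ [v]) t := by
          simp [pvGrp, hv]
        rw [hg, ih t (c ++ [v]) hlen' (by simp)]
        simp only [List.map_append, List.map_cons, List.map_nil]
        rw [pv_zip_concat _ _ hmapc, List.getLastD_concat,
            pv_headD_append _ _ _ hc, pvGo_pos _ _ _ _ hv]
        have hlast : (c.map pvD).getLastD 0 = pvD (c.getLastD 0) := by
          have h := pv_getLastD_map c 0
          rwa [show pvD 0 = 0 from rfl] at h
        rw [hlast]
        simp

theorem pv_drop_one (l : List Int) (i : Nat) (h : i < l.length) :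
    l.drop i = l.getD i 0 :: l.drop (i+1) := by
  rw [List.drop_eq_getElem_cons h, List.getD_eq_getElem _ _ h]

theorem pv_drop_two (l : List Int) (i : Nat) (h : i + 1 < l.length) :
    l.drop i = l.getD i 0 :: l.getD (i+1) 0 :: l.drop (i+2) := by
  rw [List.drop_eq_getElem_cons (show i < l.length by omega), List.drop_eq_getElem_cons h]
  rw [List.getD_eq_getElem _ _ (show i < l.length by omega), List.getD_eq_getElem _ _ h]

theorem pv_head_drop (l : List Int) (i : Nat) (a : Int) (r : List Int) (h : l.drop i = a :: r) :
    l.getD i 0 = a := by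
  have h2 : (l.drop i)[0]? = some a := by simp [h]
  rw [List.getElem?_drop] at h2
  simp only [Nat.add_zero] at h2
  simp [List.getD_eq_getElem?_getD, h2]

-- A's loop computes pvGo of the remaining suffix, appended to the accumulator
theorem pvLoopA_char (l : List Int) (i first : Nat) (out : List (Int × Int)) :
    pvLoopA l i first out = out ++ pvGo (l.getD first 0) (l.drop i) := by
  fun_induction pvLoopA with
  | case1 i first out h x y out' hneg ih =>
    rw [ih, pv_drop_two l i h]
    cases hr : l.drop (i+2) with
    | nil => rw [pvGo_neg_nil _ _ _ hneg]; simp [pvGo, x, y, out', pvD]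
    | cons a r =>
      rw [pvGo_neg_cons _ _ _ _ _ hneg, pv_head_drop l (i+2) a r hr]
      simp [x, y, out', pvD]
  | case2 i first out h x y out' hneg ih =>
    rw [ih, pv_drop_one l (i+1) h, pv_drop_two l i h, pvGo_pos _ _ _ _ hneg]
    simp [x, y, out', pvD]
  | case3 i first out h =>
    have hlen : (l.drop i).length < 2 := by simp; omega
    match hr : l.drop i, hlen with
    | [], _ => simp [pvGo]
    | [a], _ => simp [pvGo]

-- B's grouping phase computes the same edges as pvGo, for any nonempty open face c

theorem pvGrp_nil_char (xs : List Int) :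
    (pvGrp [] xs).flatMap pvEmit = pvEF xs := by
  cases xs with
  | nil => simp [pvGrp, pvEF]
  | cons a r =>
    have hg : pvGrp ([] : List Int) (a :: r) = pvGrp [a] r := by simp [pvGrp]
    rw [hg]
    have h := pvGrp_aux r.length r [a] le_rfl (by simp)
    simpa [pvEF] using h

-- ===== VERDICT (by name: the statement is the Claim_ definition above) =====
theorem list2edges_spec : Claim_equal_list2edges := by
  intro l _
  unfold Spec_list2edges list2edges list2edges_alt
  rw [pvLoopA_char, pvGrp_nil_char]
  cases l with
  | nil => rfl
  | cons a t => simp [pvEF]
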